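-- pv_equiv track=rewrite | github.com/Museus/advent-of-code-2022 | day_1.py | split_food_by_elf
-- ===== SOURCE A (Python) =====
-- def split_food_by_elf(food_items):
--     results = {}
--     current_elf = 1
--
--     results[current_elf] = 0
--     for food in food_items:
--         calories = food.strip()
--         if calories:
--             results[current_elf] += int(calories)
--
--         if not calories:
--             current_elf += 1
--             results[current_elf] = 0
--
--     return results
-- ===== SOURCE B (Python) =====
-- def split_food_by_elf(food_items):
--     # Two-phase decomposition: first partition the lines into per-elf segments
--     # (splitting on each blank line individually, so empty elves are kept),
--     # then build the 1-indexed dict of segment sums in one comprehension.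
--     segments = []
--     current = []
--     for line in food_items:
--         calories = line.strip()
--         if calories:
--             current.append(int(calories))
--         else:
--             segments.append(current)
--             current = []
--     segments.append(current)
--     return {i + 1: sum(seg) for i, seg in enumerate(segments)}
-- ===== Notes on version B (the rewrite author's own statement) =====
-- stated objective: alternative
-- what changed: A accumulates sums in a mutable dict keyed by a running elf counter; B first partitions the lines into per-elf segments (splitting on each blank line, keeping empty segments) and then builds the 1-indexed result in one enumerate comprehension of segment sums.
-- outside the precondition, e.g. on split_food_by_elf(['abc']): A raises ValueError, B raises ValueError
import Mathlib
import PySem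

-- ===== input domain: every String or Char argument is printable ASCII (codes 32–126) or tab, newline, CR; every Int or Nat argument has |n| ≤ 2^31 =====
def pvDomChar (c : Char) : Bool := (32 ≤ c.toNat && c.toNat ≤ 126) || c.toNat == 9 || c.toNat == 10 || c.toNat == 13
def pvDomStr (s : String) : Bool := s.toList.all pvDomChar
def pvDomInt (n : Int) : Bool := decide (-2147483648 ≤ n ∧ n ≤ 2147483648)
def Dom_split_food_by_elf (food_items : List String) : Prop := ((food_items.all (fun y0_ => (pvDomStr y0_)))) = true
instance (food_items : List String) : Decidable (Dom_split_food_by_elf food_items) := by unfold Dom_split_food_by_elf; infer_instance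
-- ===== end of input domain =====

-- B replaces A's mutable dict-with-counter accumulation by a two-phase decomposition
-- (partition lines into per-elf segments, then one enumerate-comprehension of sums); alternative, same cost.


-- ===== PORT A =====
-- loop body of A: 'calories = food.strip(); if calories: results[cur] += int(calories); if not calories: cur += 1; results[cur] = 0'
def pvStepA (st : PySem.Dict Int Int × Int) (food : String) : PySem.Dict Int Int × Int :=
  let calories := PySem.Str.strip food
  let st1 := if calories ≠ "" then (st.1.modify st.2 0 (· + (PySem.Int.ofStr? calories).getD 0), st.2) else st
  if calories = "" then (st1.1.insert (st1.2 + 1) 0, st1.2 + 1) else st1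

def split_food_by_elf (food_items : List String) : List (Int × Int) :=
  ((food_items.foldl pvStepA ((PySem.Dict.empty).insert 1 0, 1)).1).items

-- ===== PORT B =====
-- loop body of B: append int(calories) to the current segment, or close the segment on a blank line
def pvStepB (st : List (List Int) × List Int) (line : String) : List (List Int) × List Int :=
  let calories := PySem.Str.strip line
  if calories ≠ "" then (st.1, st.2 ++ [(PySem.Int.ofStr? calories).getD 0])
  else (st.1 ++ [st.2], [])

-- the final dict comprehension has the distinct keys 1..len in order, so its items are this map
def split_food_by_elf_alt (food_items : List String) : List (Int × Int) :=
  let st := food_items.foldl pvStepB ([], [])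
  (PySem.List.enumerate (st.1 ++ [st.2]) 0).map (fun p => (p.1 + 1, p.2.sum))

-- ===== PRECONDITION & SPEC =====
-- A raises ValueError when some non-blank stripped line is not an int literal; B raises there too.
def Pre_split_food_by_elf (food_items : List String) : Prop :=
  (food_items.all (fun s =>
    (PySem.Str.strip s == "") || (PySem.Int.ofStr? (PySem.Str.strip s)).isSome)) = true

instance (food_items : List String) : Decidable (Pre_split_food_by_elf food_items) := by
  unfold Pre_split_food_by_elf; infer_instance

def pvWitness_split_food_by_elf : List String := ["100", "200", "", "300"]

def Spec_split_food_by_elf (food_items : List String) (out : List (Int × Int)) : Prop :=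
  out = split_food_by_elf_alt food_items
instance (food_items : List String) (out : List (Int × Int)) : Decidable (Spec_split_food_by_elf food_items out) := by
  unfold Spec_split_food_by_elf; infer_instance

-- ===== CLAIM (what is proved, stated in full; the proofs are below) =====
def Claim_equal_split_food_by_elf : Prop := ∀ (food_items : List String), Dom_split_food_by_elf food_items → Pre_split_food_by_elf food_items → Spec_split_food_by_elf food_items (split_food_by_elf food_items)

-- ===== LEMMAS AND PROOFS =====

-- B's rendering of a segment list as (index+1, sum) pairs
def pvRender (segs : List (List Int)) : List (Int × Int) :=
  (PySem.List.enumerate segs 0).map (fun p => (p.1 + 1, p.2.sum))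

lemma pvRender_append (segs : List (List Int)) (c : List Int) :
    pvRender (segs ++ [c]) = pvRender segs ++ [((segs.length : Int) + 1, c.sum)] := by
  simp [pvRender, PySem.List.enumerate_append, PySem.List.enumerate_cons]

lemma pvRender_keys_lt (segs : List (List Int)) :
    ∀ p ∈ pvRender segs, p.1 < (segs.length : Int) + 1 := by
  intro p hp
  simp only [pvRender, List.mem_map] at hp
  obtain ⟨q, hq, rfl⟩ := hp
  rw [PySem.List.mem_enumerate_iff] at hq
  obtain ⟨k, hk, rfl⟩ := hq
  simp; omega

lemma pvGet_last (L : List (Int × Int)) (k : Int) (v : Int) (h : ∀ p ∈ L, p.1 ≠ k) :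
    (PySem.Dict.mk (L ++ [(k, v)]) : PySem.Dict Int Int).get? k = some v := by
  induction L with
  | nil => simp [PySem.Dict.get?_mk_cons]
  | cons p L ih =>
    rw [List.cons_append, PySem.Dict.get?_mk_cons]
    have hne : p.1 ≠ k := h p (by simp)
    simp only [beq_iff_eq, if_neg hne]
    exact ih (fun q hq => h q (by simp [hq]))

lemma pvGet_none (L : List (Int × Int)) (k : Int) (h : ∀ p ∈ L, p.1 ≠ k) :
    (PySem.Dict.mk L : PySem.Dict Int Int).get? k = none := by
  induction L with
  | nil => rfl
  | cons p L ih =>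
    rw [PySem.Dict.get?_mk_cons]
    have hne : p.1 ≠ k := h p (by simp)
    simp only [beq_iff_eq, if_neg hne]
    exact ih (fun q hq => h q (by simp [hq]))

set_option maxHeartbeats 1000000 in
lemma pvLoop_inv (l : List String) :
    ∀ (segs : List (List Int)) (cs : List Int) (d : PySem.Dict Int Int),
    d.items = pvRender segs ++ [((segs.length : Int) + 1, cs.sum)] →
    ((l.foldl pvStepA (d, (segs.length : Int) + 1)).1).items =
      pvRender ((l.foldl pvStepB (segs, cs)).1 ++ [(l.foldl pvStepB (segs, cs)).2]) := by
  induction l with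
  | nil =>
    intro segs cs d hd
    simpa [pvRender_append] using hd
  | cons s l ih =>
    intro segs cs d hd
    by_cases hblank : PySem.Str.strip s = ""
    · -- blank line: A opens key cur+1, B closes the current segment
      have hA : pvStepA (d, (segs.length : Int) + 1) s =
          (d.insert ((segs.length : Int) + 1 + 1) 0, (segs.length : Int) + 1 + 1) := by
        simp [pvStepA, hblank]
      have hB : pvStepB (segs, cs) s = (segs ++ [cs], []) := by
        simp [pvStepB, hblank]
      have hnc : d.contains ((segs.length : Int) + 1 + 1) = false := by
        have hall : ∀ p ∈ d.items, p.1 ≠ (segs.length : Int) + 1 + 1 := by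
          intro p hp
          rw [hd] at hp
          rcases List.mem_append.1 hp with h1 | h1
          · have := pvRender_keys_lt segs p h1; omega
          · simp at h1; subst h1; simp
        have hnone : d.get? ((segs.length : Int) + 1 + 1) = none := by
          have := pvGet_none d.items ((segs.length : Int) + 1 + 1) hall
          simpa using this
        exact (PySem.Dict.get?_eq_none_iff_contains d _).1 hnone
      have hitems : (d.insert ((segs.length : Int) + 1 + 1) 0).items =
          pvRender (segs ++ [cs]) ++ [(((segs ++ [cs]).length : Int) + 1, (0 : Int))] := by
        rw [PySem.Dict.items_insert_of_not_contains _ _ hnc, hd, pvRender_append]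
        simp
      have hcur : ((segs.length : Int) + 1 + 1) = (((segs ++ [cs]).length : Int) + 1) := by
        simp
      rw [List.foldl_cons, List.foldl_cons, hA, hB, hcur]
      exact ih (segs ++ [cs]) [] _ (by simpa using hitems)
    · -- numeric line: A bumps the current key in place, B extends the current segment
      obtain ⟨x, hx⟩ : ∃ x : Int, (PySem.Int.ofStr? (PySem.Str.strip s)).getD 0 = x := ⟨_, rfl⟩
      have hg : d.get? ((segs.length : Int) + 1) = some cs.sum := by
        have := pvGet_last (pvRender segs) ((segs.length : Int) + 1) cs.sum
          (fun p hp => ne_of_lt (pvRender_keys_lt segs p hp))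
        rw [← hd] at this
        simpa using this
      have hcont : d.contains ((segs.length : Int) + 1) = true := by
        by_contra hc
        have hc' : d.contains ((segs.length : Int) + 1) = false := by
          cases h : d.contains ((segs.length : Int) + 1) <;> simp_all
        have := (PySem.Dict.get?_eq_none_iff_contains d _).2 hc'
        rw [hg] at this
        cases this
      have hgd : d.getD ((segs.length : Int) + 1) 0 = cs.sum :=
        PySem.Dict.getD_of_get?_eq_some d 0 hg
      have hA : pvStepA (d, (segs.length : Int) + 1) s =
          (d.insert ((segs.length : Int) + 1) (cs.sum + x), (segs.length : Int) + 1) := by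
        simp [pvStepA, hblank, PySem.Dict.modify, hgd, hx]
      have hB : pvStepB (segs, cs) s = (segs, cs ++ [x]) := by
        simp [pvStepB, hblank, hx]
      have hitems : (d.insert ((segs.length : Int) + 1) (cs.sum + x)).items =
          pvRender segs ++ [((segs.length : Int) + 1, (cs ++ [x]).sum)] := by
        rw [PySem.Dict.items_insert_of_contains _ _ hcont, hd]
        rw [List.map_append]
        congr 1
        · have heach : ∀ p ∈ pvRender segs,
              (fun p => if (p.1 == ((segs.length : Int) + 1)) = true
                then (((segs.length : Int) + 1), cs.sum + x) else p) p = id p := by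
            intro p hp
            have := pvRender_keys_lt segs p hp
            simp only [beq_iff_eq, id]
            rw [if_neg (by omega)]
          rw [List.map_congr_left heach, List.map_id]
        · simp
      rw [List.foldl_cons, List.foldl_cons, hA, hB]
      exact ih segs (cs ++ [x]) _ hitems

-- ===== VERDICT (by name: the statement is the Claim_ definition above) =====
set_option maxHeartbeats 1000000 in
theorem split_food_by_elf_spec : Claim_equal_split_food_by_elf := by
  intro food_items _ _
  show split_food_by_elf food_items = split_food_by_elf_alt food_items
  unfold split_food_by_elf split_food_by_elf_alt
  have h := pvLoop_inv food_items [] [] ((PySem.Dict.empty).insert 1 0) (by decide)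
  simpa [pvRender] using h
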